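-- pv_equiv track=rewrite | github.com/Winston-Hu/meter-reading-system-AllinOne | apps/backend/NEM12_generater/usthub_botany_mascot001_Daily/lib/step5_multiple300_clear610.py | modify_300_and_610
-- ===== SOURCE A (Python) =====
-- def modify_300_and_610(lines):
--     """
--     Check and modify line 300 and the corresponding line 610 in the file content。
--     """
--     modified_lines = lines[:]
--     for idx, line in enumerate(lines):
--         if line.startswith("300"):
--             parts = line.strip().split(",")
--             if "N" in parts[-4]:  # flag is N
--                 # 300, 96 intervals should be all 0.000
--                 parts[2:98] = ["0.000"] * 96
--                 modified_lines[idx] = ",".join(parts) + "\n"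
--
--                 # Find the corresponding 610 rows
--                 for j in range(idx + 1, len(lines)):
--                     if lines[j].startswith("610"):
--                         parts_610 = lines[j].strip().split(",")
--                         # Change the first number after ‘W1’ in line 610 to 0.00000
--                         for k in range(len(parts_610)):
--                             if parts_610[k] == "W1" and k + 1 < len(parts_610):
--                                 parts_610[k + 1] = "0.000"
--                                 modified_lines[j] = ",".join(parts_610) + "\n"
--                                 break
--                         break
--     return modified_lines
-- ===== SOURCE B (Python) =====
-- def _fix_610(line):
--     parts = line.strip().split(",")
--     for k in range(len(parts) - 1):
--         if parts[k] == "W1":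
--             parts[k + 1] = "0.000"
--             return ",".join(parts) + "\n"
--     return None
--
--
-- def modify_300_and_610(lines):
--     n = len(lines)
--     # reverse pass: nxt[i] = index of the first "610" line at or after i (None if none)
--     nxt = [None] * (n + 1)
--     for i in range(n - 1, -1, -1):
--         nxt[i] = i if lines[i].startswith("610") else nxt[i + 1]
--     out = list(lines)
--     for idx, line in enumerate(lines):
--         if line.startswith("300"):
--             parts = line.strip().split(",")
--             if "N" in parts[-4]:
--                 out[idx] = ",".join(parts[:2] + ["0.000"] * 96 + parts[98:]) + "\n"
--                 j = nxt[idx + 1]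
--                 if j is not None:
--                     fixed = _fix_610(lines[j])
--                     if fixed is not None:
--                         out[j] = fixed
--     return out
-- ===== Notes on version B (the rewrite author's own statement) =====
-- stated objective: alternative
-- what changed: A rescans forward from each 300-N line to find the next 610 line (quadratic worst case); B precomputes the next-610 index for every position in one reverse pass and looks it up in O(1) per 300 line, with the 610 edit extracted into a helper.
import Mathlib
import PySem

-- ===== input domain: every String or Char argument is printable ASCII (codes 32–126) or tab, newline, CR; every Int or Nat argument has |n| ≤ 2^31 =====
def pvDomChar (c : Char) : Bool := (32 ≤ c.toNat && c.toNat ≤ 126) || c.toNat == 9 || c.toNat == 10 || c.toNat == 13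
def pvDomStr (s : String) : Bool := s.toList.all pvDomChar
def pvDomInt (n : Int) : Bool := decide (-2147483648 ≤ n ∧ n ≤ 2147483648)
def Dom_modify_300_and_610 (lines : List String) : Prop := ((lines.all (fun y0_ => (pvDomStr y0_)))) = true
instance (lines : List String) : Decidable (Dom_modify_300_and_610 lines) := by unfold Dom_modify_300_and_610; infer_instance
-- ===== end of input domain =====

-- B replaces A's per-300-line forward scan for the next "610" line by a single reverse pass that
-- precomputes the next-610 index for every position, looked up per 300 line (objective: alternative).


-- ===== PORT A =====

-- inner 'for k in range(len(parts_610))' loop: first k with parts[k]=="W1" and k+1<len; set parts[k+1]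
def aFixParts (parts : List String) (k : Nat) : Option (List String) :=
  if _hk : k < parts.length then
    if parts.getD k "" == "W1" && decide (k + 1 < parts.length) then
      some (parts.set (k + 1) "0.000")
    else aFixParts parts (k + 1)
  else none
termination_by parts.length - k

-- inner 'for j in range(idx+1, len(lines))' loop with break at the first "610" line
def aFind610 (lines : List String) (modl : List String) (j : Nat) : List String :=
  if _hj : j < lines.length then
    let lj := lines.getD j ""
    if PySem.Str.startswith lj "610" then
      match aFixParts ((PySem.Str.split? (PySem.Str.strip lj) ",").getD []) 0 with
      | some parts => modl.set j (PySem.Str.join "," parts ++ "\n")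
      | none => modl
    else aFind610 lines modl (j + 1)
  else modl
termination_by lines.length - j

def modify_300_and_610 (lines : List String) : List String :=
  (PySem.List.enumerate lines 0).foldl
    (fun modl p =>
      let idx := p.1.toNat
      if PySem.Str.startswith p.2 "300" then
        let parts := (PySem.Str.split? (PySem.Str.strip p.2) ",").getD []
        -- parts[-4]: Pre_ guarantees ≥ 4 fields (Python raises IndexError otherwise)
        if PySem.Str.isIn "N" ((PySem.List.pyGet? parts (-4)).getD "") then
          -- parts[2:98] = ["0.000"]*96 : exact slice-assignment semantics (clamped take/drop)
          let parts := parts.take 2 ++ List.replicate 96 "0.000" ++ parts.drop 98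
          let modl := modl.set idx (PySem.Str.join "," parts ++ "\n")
          aFind610 lines modl (idx + 1)
        else modl
      else modl)
    lines

-- ===== PORT B =====

-- reverse pass: nxt list of length len+1, entry i = first index ≥ i (absolute offset i0) of a "610" line
def bNxt (lines : List String) (i0 : Nat) : List (Option Nat) :=
  match lines with
  | [] => [none]
  | l :: rest =>
    let tail := bNxt rest (i0 + 1)
    (if PySem.Str.startswith l "610" then some i0 else tail.headD none) :: tail

-- _fix_610's 'for k in range(len(parts)-1)' loop
def bFixGo (parts : List String) (k : Nat) : Option String :=
  if _hk : k + 1 < parts.length then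
    if parts.getD k "" == "W1" then
      some (PySem.Str.join "," (parts.set (k + 1) "0.000") ++ "\n")
    else bFixGo parts (k + 1)
  else none
termination_by parts.length - k

def bFix610 (line : String) : Option String :=
  bFixGo ((PySem.Str.split? (PySem.Str.strip line) ",").getD []) 0

def modify_300_and_610_alt (lines : List String) : List String :=
  let nxt := bNxt lines 0
  (PySem.List.enumerate lines 0).foldl
    (fun out p =>
      let idx := p.1.toNat
      if PySem.Str.startswith p.2 "300" then
        let parts := (PySem.Str.split? (PySem.Str.strip p.2) ",").getD []
        if PySem.Str.isIn "N" ((PySem.List.pyGet? parts (-4)).getD "") then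
          let out := out.set idx
            (PySem.Str.join "," (parts.take 2 ++ List.replicate 96 "0.000" ++ parts.drop 98) ++ "\n")
          match nxt.getD (idx + 1) none with
          | some j =>
            match bFix610 (lines.getD j "") with
            | some s => out.set j s
            | none => out
          | none => out
        else out
      else out)
    lines

-- ===== PRECONDITION & SPEC =====
-- Pre_ excludes exactly the inputs on which Python A raises IndexError: a line starting with "300"
-- whose stripped comma-split has fewer than 4 fields (parts[-4] out of range; B raises there too).
def Pre_modify_300_and_610 (lines : List String) : Prop :=
  ∀ line ∈ lines, PySem.Str.startswith line "300" = true →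
    4 ≤ ((PySem.Str.split? (PySem.Str.strip line) ",").getD []).length
instance (lines : List String) : Decidable (Pre_modify_300_and_610 lines) := by
  unfold Pre_modify_300_and_610; infer_instance

def pvWitness_modify_300_and_610 : List String :=
  ["100,NEM12\n", "300,20240101,1.0,2.0,N,E\n", "610,W1,5.000\n"]

def Spec_modify_300_and_610 (lines : List String) (out : List String) : Prop := out = modify_300_and_610_alt lines
instance (lines : List String) (out : List String) : Decidable (Spec_modify_300_and_610 lines out) := by unfold Spec_modify_300_and_610; infer_instance

-- ===== CLAIM (what is proved, stated in full; the proofs are below) =====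
def Claim_equal_modify_300_and_610 : Prop := ∀ (lines : List String), Dom_modify_300_and_610 lines → Pre_modify_300_and_610 lines → Spec_modify_300_and_610 lines (modify_300_and_610 lines)

-- ===== LEMMAS AND PROOFS =====

-- proof-only: index of the first "610" line at position ≥ j (what A's inner scan finds)
def f610 (lines : List String) (j : Nat) : Option Nat :=
  if _hj : j < lines.length then
    if PySem.Str.startswith (lines.getD j "") "610" then some j else f610 lines (j + 1)
  else none
termination_by lines.length - j

-- B's W1 loop computes A's W1 loop's result, already joined
theorem fix_eq (parts : List String) (k : Nat) :
    bFixGo parts k = (aFixParts parts k).map (fun ps => PySem.Str.join "," ps ++ "\n") := by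
  fun_induction aFixParts parts k with
  | case1 k hk hc =>
    simp only [Bool.and_eq_true, decide_eq_true_eq] at hc
    rw [bFixGo, dif_pos hc.2, if_pos hc.1]
    rfl
  | case2 k hk hc ih =>
    simp only [Bool.and_eq_true, decide_eq_true_eq, not_and] at hc
    by_cases h1 : k + 1 < parts.length
    · have hw : ¬ (parts.getD k "" == "W1") = true := fun hw => (hc hw) h1
      rw [bFixGo, dif_pos h1, if_neg hw]
      exact ih
    · rw [bFixGo, dif_neg h1, aFixParts, dif_neg h1]
      rfl
  | case3 k hk =>
    rw [bFixGo, dif_neg (by omega : ¬ k + 1 < parts.length)]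
    rfl

-- A's inner scan characterised through f610
theorem aFind610_eq (lines modl : List String) (j : Nat) :
    aFind610 lines modl j =
      match f610 lines j with
      | some t =>
        match aFixParts ((PySem.Str.split? (PySem.Str.strip (lines.getD t "")) ",").getD []) 0 with
        | some parts => modl.set t (PySem.Str.join "," parts ++ "\n")
        | none => modl
      | none => modl := by
  fun_induction aFind610 lines modl j with
  | case1 j hj lj h6 parts hfix =>
    rw [f610, dif_pos hj, if_pos h6]
    have hfix' : aFixParts ((PySem.Str.split? (PySem.Str.strip (lines.getD j "")) ",").getD []) 0 = some parts := hfix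
    simp only [hfix']
  | case2 j hj lj h6 hfix =>
    rw [f610, dif_pos hj, if_pos h6]
    have hfix' : aFixParts ((PySem.Str.split? (PySem.Str.strip (lines.getD j "")) ",").getD []) 0 = none := hfix
    simp only [hfix']
  | case3 j hj lj h6 ih =>
    rw [f610, dif_pos hj, if_neg h6]
    exact ih
  | case4 j hj =>
    rw [f610, dif_neg hj]

theorem f610_cons (l : String) (rest : List String) (j : Nat) :
    f610 (l :: rest) (j + 1) = (f610 rest j).map (· + 1) := by
  fun_induction f610 rest j with
  | case1 j hj h6 =>
    rw [f610, dif_pos (by simpa using Nat.succ_lt_succ hj)]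
    simp only [List.getD_cons_succ] at *
    rw [if_pos h6]
    rfl
  | case2 j hj h6 ih =>
    rw [f610, dif_pos (by simpa using Nat.succ_lt_succ hj)]
    simp only [List.getD_cons_succ] at *
    rw [if_neg h6]
    exact ih
  | case3 j hj =>
    rw [f610, dif_neg (by simpa using fun h => hj (Nat.lt_of_succ_lt_succ h))]
    rfl

-- B's reverse-pass table agrees with A's forward scan: entry d is the first 610 index ≥ d
theorem bNxt_getD (lines : List String) (i0 d : Nat) :
    (bNxt lines i0).getD d none = (f610 lines d).map (· + i0) := by
  induction lines generalizing i0 d with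
  | nil =>
    rw [f610]
    simp [bNxt]
  | cons l rest ih =>
    rw [bNxt]
    cases d with
    | zero =>
      simp only [List.getD_cons_zero]
      rw [f610, dif_pos (by simp)]
      simp only [List.getD_cons_zero]
      by_cases h6 : PySem.Str.startswith l "610" = true
      · rw [if_pos h6, if_pos h6]
        simp
      · rw [if_neg h6, if_neg h6]
        have : (bNxt rest (i0+1)).headD none = (bNxt rest (i0+1)).getD 0 none := by
          cases hb : bNxt rest (i0+1) <;> simp
        rw [this, ih, f610_cons]
        cases f610 rest 0 <;> simp <;> try omega
    | succ e =>
      simp only [List.getD_cons_succ]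
      rw [ih, f610_cons]
      cases f610 rest e <;> simp <;> try omega

theorem modify_eq_alt (lines : List String) : modify_300_and_610 lines = modify_300_and_610_alt lines := by
  unfold modify_300_and_610 modify_300_and_610_alt
  apply PySem.List.foldl_congr_mem
  intro modl p _
  dsimp only
  by_cases h3 : PySem.Str.startswith p.2 "300" = true
  · rw [if_pos h3, if_pos h3]
    by_cases hN : PySem.Str.isIn "N" ((PySem.List.pyGet? ((PySem.Str.split? (PySem.Str.strip p.2) ",").getD []) (-4)).getD "") = true
    · rw [if_pos hN, if_pos hN]
      rw [aFind610_eq, bNxt_getD]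
      cases hf : f610 lines (p.1.toNat + 1) with
      | none => rfl
      | some t =>
        simp only [Option.map_some, Nat.add_zero]
        rw [show bFix610 (lines.getD t "") = (aFixParts ((PySem.Str.split? (PySem.Str.strip (lines.getD t "")) ",").getD []) 0).map (fun ps => PySem.Str.join "," ps ++ "\n") from fix_eq _ 0]
        cases aFixParts ((PySem.Str.split? (PySem.Str.strip (lines.getD t "")) ",").getD []) 0 <;> rfl
    · rw [if_neg hN, if_neg hN]
  · rw [if_neg h3, if_neg h3]

-- ===== VERDICT (by name: the statement is the Claim_ definition above) =====
theorem modify_300_and_610_spec : Claim_equal_modify_300_and_610 := by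
  intro lines _ _
  show modify_300_and_610 lines = modify_300_and_610_alt lines
  exact modify_eq_alt lines
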